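-- pv_equiv track=rewrite | github.com/alba-97/ml_test | ml_test_app/utils/check_sequences.py | count_sequence
-- ===== SOURCE A (Python) =====
-- def count_sequence(sequence):
--     valid_letters = {'A', 'T', 'C', 'G'}
--     sequences_found = 0
--
--     for i in range(len(sequence) - 3):
--         if sequence[i].upper() in valid_letters and sequence[i].lower() == sequence[i + 1].lower() == sequence[i + 2].lower() == sequence[i + 3].lower():
--             if i + 4 < len(sequence) and sequence[i].lower() == sequence[i + 4].lower():
--                 continue
--             sequences_found += 1
--
--     return sequences_found
-- ===== SOURCE B (Python) =====
-- def count_sequence(sequence):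
--     seq = sequence.lower()
--     count = 0
--     rest = seq
--     while rest:
--         ch = rest[0]
--         run_len = 1
--         while run_len < len(rest) and rest[run_len] == ch:
--             run_len += 1
--         if ch in 'atcg' and run_len >= 4:
--             count += 1
--         rest = rest[run_len:]
--     return count
-- ===== Notes on version B (the rewrite author's own statement) =====
-- stated objective: simpler
-- what changed: A slides a 4-wide window over every index and uses a lookahead skip to avoid double-counting; B lowercases once and does a single run-length scan, counting each maximal run of a/t/c/g whose length is at least 4.
import Mathlib
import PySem

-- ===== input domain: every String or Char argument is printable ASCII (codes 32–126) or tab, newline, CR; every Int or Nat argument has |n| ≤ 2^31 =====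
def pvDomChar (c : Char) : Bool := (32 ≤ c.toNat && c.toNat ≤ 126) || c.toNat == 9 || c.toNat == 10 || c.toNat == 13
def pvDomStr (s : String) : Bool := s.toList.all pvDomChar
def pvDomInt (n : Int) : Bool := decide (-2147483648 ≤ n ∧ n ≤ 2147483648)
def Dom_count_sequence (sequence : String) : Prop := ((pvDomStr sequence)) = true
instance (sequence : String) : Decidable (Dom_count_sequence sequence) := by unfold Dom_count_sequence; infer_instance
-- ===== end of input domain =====

-- B replaces A's sliding 4-window scan with lookahead by a single run-length scan over the
-- lowercased string (count maximal runs of a/t/c/g of length ≥ 4); objective: simpler.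

-- ===== PORT A =====
-- Python's 1-char-string s[i].lower()/.upper() is PySem.Chars.lowerChar/upperChar
-- (PySem.Chars.lower = List.map PySem.Chars.lowerChar); indices i..i+4 are in range whenever
-- the corresponding Python access happens, so pyGetD's default ' ' is never returned.
def count_sequence (sequence : String) : Int :=
  let s := sequence.toList
  (PySem.List.pyRange 0 ((s.length : Int) - 3) 1).foldl (fun acc i =>
    if PySem.Chars.upperChar (PySem.List.pyGetD s i ' ') ∈ (['A','T','C','G'] : List Char)
        ∧ PySem.Chars.lowerChar (PySem.List.pyGetD s i ' ')
            = PySem.Chars.lowerChar (PySem.List.pyGetD s (i+1) ' ')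
        ∧ PySem.Chars.lowerChar (PySem.List.pyGetD s (i+1) ' ')
            = PySem.Chars.lowerChar (PySem.List.pyGetD s (i+2) ' ')
        ∧ PySem.Chars.lowerChar (PySem.List.pyGetD s (i+2) ' ')
            = PySem.Chars.lowerChar (PySem.List.pyGetD s (i+3) ' ') then
      if i + 4 < (s.length : Int)
          ∧ PySem.Chars.lowerChar (PySem.List.pyGetD s i ' ')
              = PySem.Chars.lowerChar (PySem.List.pyGetD s (i+4) ' ') then
        acc
      else acc + 1
    else acc) 0

-- ===== PORT B =====
-- Source B's outer while peels one maximal run per iteration: rest[0] is the run letter, the inner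
-- while measures the run (takeWhile on the tail), and rest = rest[run_len:] (dropWhile on the tail).
def countRunsB : List Char → Int
  | [] => 0
  | c :: rest =>
    let runLen := 1 + (rest.takeWhile (· == c)).length
    (if c ∈ (['a','t','c','g'] : List Char) ∧ 4 ≤ runLen then 1 else 0)
      + countRunsB (rest.dropWhile (· == c))
  termination_by l => l.length
  decreasing_by
    have := List.length_dropWhile_le (p := (· == c)) (l := rest)
    simp only [List.length_cons]; omega

def count_sequence_alt (sequence : String) : Int :=
  countRunsB (PySem.Chars.lower sequence.toList)

-- ===== PRECONDITION & SPEC =====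
def Spec_count_sequence (sequence : String) (out : Int) : Prop := out = count_sequence_alt sequence
instance (sequence : String) (out : Int) : Decidable (Spec_count_sequence sequence out) := by unfold Spec_count_sequence; infer_instance

-- ===== CLAIM (what is proved, stated in full; the proofs are below) =====
def Claim_equal_count_sequence : Prop := ∀ (sequence : String), Dom_count_sequence sequence → Spec_count_sequence sequence (count_sequence sequence)

-- ===== LEMMAS AND PROOFS =====

-- the window predicate of A's loop body, read on the lowercased list m
def pvAtcg : List Char := ['a','t','c','g']

def pvWb (m : List Char) (i : Nat) : Bool :=
  decide ((i + 3 < m.length) ∧ (m.getD i ' ' ∈ pvAtcg) ∧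
    m.getD i ' ' = m.getD (i+1) ' ' ∧ m.getD (i+1) ' ' = m.getD (i+2) ' ' ∧
    m.getD (i+2) ' ' = m.getD (i+3) ' ' ∧
    ¬((i + 4 < m.length) ∧ m.getD i ' ' = m.getD (i+4) ' '))

theorem pv_upperMemIff (c : Char) : (PySem.Chars.upperChar c ∈ (['A','T','C','G'] : List Char)) ↔ (PySem.Chars.lowerChar c ∈ (['a','t','c','g'] : List Char)) := by
  have hle : ∀ d e : Char, (d ≤ e) = (d.toNat ≤ e.toNat) := fun d e => by
    rw [Char.le_def, UInt32.le_iff_toNat_le]; rfl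
  have heq : ∀ d e : Char, (d = e) = (d.toNat = e.toNat) := fun d e => propext
    ⟨fun h => h ▸ rfl, fun h => Char.ext (UInt32.toNat_inj.mp h)⟩
  have hofNat : ∀ n : Nat, n < 55296 → (Char.ofNat n).toNat = n := by
    intro n hn; simp [Char.toNat_ofNat]; omega
  simp only [PySem.Chars.upperChar, PySem.Chars.lowerChar, PySem.Chars.islower, PySem.Chars.isupper,
    Bool.and_eq_true, decide_eq_true_eq, List.mem_cons, List.not_mem_nil, or_false, hle, heq,
    Char.reduceToNat]
  by_cases h1 : 97 ≤ c.toNat ∧ c.toNat ≤ 122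
  · rw [if_pos h1, if_neg (by omega)]
    simp only [hofNat _ (by omega : c.toNat - 32 < 55296)]
    omega
  · rw [if_neg h1]
    by_cases h2 : 65 ≤ c.toNat ∧ c.toNat ≤ 90
    · rw [if_pos h2]
      simp only [hofNat _ (by omega : c.toNat + 32 < 55296)]
      omega
    · rw [if_neg h2]; omega

theorem pv_getD_run (c : Char) (r : Nat) (t : List Char) (k : Nat) :
    (List.replicate r c ++ t).getD (r + k) ' ' = t.getD k ' ' := by
  rw [List.getD_eq_getElem?_getD, List.getD_eq_getElem?_getD,
    List.getElem?_append_right (by simp)]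
  simp

theorem pv_getD_rep (c : Char) (r : Nat) (t : List Char) (k : Nat) (hk : k < r) :
    (List.replicate r c ++ t).getD k ' ' = c := by
  rw [List.getD_eq_getElem?_getD, List.getElem?_append_left (by simp [hk])]
  simp [hk]

theorem pv_countP_run (c : Char) (r : Nat) (t : List Char) (hr : 1 ≤ r)
    (ht : ∀ d ∈ t.head?, d ≠ c) :
    (List.range (r + t.length)).countP (pvWb (List.replicate r c ++ t)) =
      (if c ∈ pvAtcg ∧ 4 ≤ r then 1 else 0) + (List.range t.length).countP (pvWb t) := by
  have hlen : (List.replicate r c ++ t).length = r + t.length := by simp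
  rw [List.range_add, List.countP_append, List.countP_map]
  have part2 : (List.range t.length).countP ((pvWb (List.replicate r c ++ t)) ∘ (fun x => r + x)) =
      (List.range t.length).countP (pvWb t) := by
    apply List.countP_congr
    intro j hj
    simp only [Function.comp_apply, pvWb, decide_eq_true_eq]
    have e1 : r + j + 1 = r + (j+1) := by omega
    have e2 : r + j + 2 = r + (j+2) := by omega
    have e3 : r + j + 3 = r + (j+3) := by omega
    have e4 : r + j + 4 = r + (j+4) := by omega
    rw [e1, e2, e3, e4, pv_getD_run, pv_getD_run, pv_getD_run, pv_getD_run, pv_getD_run, hlen]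
    constructor
    · rintro ⟨h1, h2⟩; exact ⟨by omega, h2.1, h2.2.1, h2.2.2.1, h2.2.2.2.1,
        fun ⟨ha, hb⟩ => h2.2.2.2.2 ⟨by omega, hb⟩⟩
    · rintro ⟨h1, h2⟩; exact ⟨by omega, h2.1, h2.2.1, h2.2.2.1, h2.2.2.2.1,
        fun ⟨ha, hb⟩ => h2.2.2.2.2 ⟨by omega, hb⟩⟩
  rw [part2]
  have part1 : (List.range r).countP (pvWb (List.replicate r c ++ t)) =
      (if c ∈ pvAtcg ∧ 4 ≤ r then 1 else 0) := by
    have hpt : ∀ i ∈ List.range r,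
        (pvWb (List.replicate r c ++ t) i = true) ↔ (decide (c ∈ pvAtcg ∧ i + 4 = r) = true) := by
      intro i hi
      rw [List.mem_range] at hi
      simp only [pvWb, decide_eq_true_eq]
      constructor
      · rintro ⟨h3, hmem, h01, h12, h23, hnext⟩
        have hi3 : i + 3 < r := by
          by_contra hge
          rcases t with _ | ⟨d, t'⟩
          · rw [hlen] at h3; simp at h3; omega
          · have hd : d ≠ c := ht d rfl
            have hgr : (List.replicate r c ++ (d::t')).getD r ' ' = d := by
              have := pv_getD_run c r (d::t') 0; simpa using this
            rcases (by omega : r = i+1 ∨ r = i+2 ∨ r = i+3) with h|h|h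
            · rw [pv_getD_rep c r _ i hi] at h01
              rw [← h, hgr] at h01; exact hd h01.symm
            · rw [pv_getD_rep c r _ i hi] at h01
              rw [← h01] at h12
              rw [← h, hgr] at h12; exact hd h12.symm
            · rw [pv_getD_rep c r _ i hi] at h01
              rw [← h01] at h12
              rw [← h12] at h23
              rw [← h, hgr] at h23; exact hd h23.symm
        have hc0 : (List.replicate r c ++ t).getD i ' ' = c := pv_getD_rep c r t i hi
        refine ⟨by rwa [hc0] at hmem, ?_⟩
        by_contra hne
        have hi4 : i + 4 < r := by omega
        exact hnext ⟨by rw [hlen]; omega, by rw [hc0, pv_getD_rep c r t _ hi4]⟩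
      · rintro ⟨hcm, h4⟩
        have h4r : 4 ≤ r := by omega
        refine ⟨by rw [hlen]; omega,
          by rw [pv_getD_rep c r t i hi]; exact hcm,
          by rw [pv_getD_rep c r t i hi, pv_getD_rep c r t _ (by omega)],
          by rw [pv_getD_rep c r t _ (by omega), pv_getD_rep c r t _ (by omega)],
          by rw [pv_getD_rep c r t _ (by omega), pv_getD_rep c r t _ (by omega)], ?_⟩
        rintro ⟨hlt, heq⟩
        rcases t with _ | ⟨d, t'⟩
        · rw [hlen] at hlt; simp at hlt; omega
        · have hd : d ≠ c := ht d rfl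
          have hgr : (List.replicate r c ++ (d::t')).getD r ' ' = d := by
            have := pv_getD_run c r (d::t') 0; simpa using this
          rw [pv_getD_rep c r _ i hi] at heq
          rw [(by omega : i + 4 = r), hgr] at heq
          exact hd heq.symm
    rw [List.countP_congr hpt]
    by_cases hc : c ∈ pvAtcg
    · by_cases h4 : 4 ≤ r
      · rw [if_pos ⟨hc, h4⟩]
        have : (List.range r).countP (fun i => decide (c ∈ pvAtcg ∧ i + 4 = r)) =
            (List.range r).countP (fun i => i == r - 4) := by
          apply List.countP_congr
          intro i hi
          rw [List.mem_range] at hi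
          simp only [decide_eq_true_eq, beq_iff_eq]
          constructor
          · rintro ⟨_, h⟩; omega
          · intro h; exact ⟨hc, by omega⟩
        rw [this]
        have := List.count_eq_one_of_mem (List.nodup_range (n := r)) (a := r - 4) (by simp [List.mem_range]; omega)
        simpa [List.count] using this
      · rw [if_neg (fun h => h4 h.2)]
        apply List.countP_eq_zero.mpr
        intro i hi
        rw [List.mem_range] at hi
        simp only [decide_eq_true_eq]
        rintro ⟨_, h⟩; omega
    · rw [if_neg (fun h => hc h.1)]
      apply List.countP_eq_zero.mpr
      intro i hi
      simp only [decide_eq_true_eq]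
      rintro ⟨h, _⟩; exact hc h
  rw [part1]

theorem pv_countP_drop3 (m : List Char) :
    (List.range m.length).countP (pvWb m) = (List.range (m.length - 3)).countP (pvWb m) := by
  conv_lhs => rw [show m.length = (m.length - 3) + (m.length - (m.length - 3)) from by omega]
  rw [List.range_add, List.countP_append]
  have hz : (List.map (fun x => m.length - 3 + x)
      (List.range (m.length - (m.length - 3)))).countP (pvWb m) = 0 := by
    apply List.countP_eq_zero.mpr
    intro i hi
    simp only [List.mem_map, List.mem_range] at hi
    obtain ⟨x, hx, rfl⟩ := hi
    intro hP
    simp only [pvWb, decide_eq_true_eq] at hP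
    have := hP.1
    omega
  omega

theorem pv_A_fold (l : List Char) :
    (PySem.List.pyRange 0 ((l.length : Int) - 3) 1).foldl (fun acc i =>
      if PySem.Chars.upperChar (PySem.List.pyGetD l i ' ') ∈ (['A','T','C','G'] : List Char)
          ∧ PySem.Chars.lowerChar (PySem.List.pyGetD l i ' ')
              = PySem.Chars.lowerChar (PySem.List.pyGetD l (i+1) ' ')
          ∧ PySem.Chars.lowerChar (PySem.List.pyGetD l (i+1) ' ')
              = PySem.Chars.lowerChar (PySem.List.pyGetD l (i+2) ' ')
          ∧ PySem.Chars.lowerChar (PySem.List.pyGetD l (i+2) ' ')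
              = PySem.Chars.lowerChar (PySem.List.pyGetD l (i+3) ' ') then
        if i + 4 < (l.length : Int)
            ∧ PySem.Chars.lowerChar (PySem.List.pyGetD l i ' ')
                = PySem.Chars.lowerChar (PySem.List.pyGetD l (i+4) ' ') then
          acc
        else acc + 1
      else acc) 0
    = ((List.range (l.map PySem.Chars.lowerChar).length).countP
        (pvWb (l.map PySem.Chars.lowerChar)) : Int) := by
  have hget : ∀ j : Nat, (l.map PySem.Chars.lowerChar).getD j ' '
      = PySem.Chars.lowerChar (l.getD j ' ') := by
    intro j
    rw [List.getD_eq_getElem?_getD, List.getD_eq_getElem?_getD, List.getElem?_map]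
    rcases h : l[j]? with _ | c
    · simp; decide
    · simp
  have hfun : (fun (acc i : Int) =>
      if PySem.Chars.upperChar (PySem.List.pyGetD l i ' ') ∈ (['A','T','C','G'] : List Char)
          ∧ PySem.Chars.lowerChar (PySem.List.pyGetD l i ' ')
              = PySem.Chars.lowerChar (PySem.List.pyGetD l (i+1) ' ')
          ∧ PySem.Chars.lowerChar (PySem.List.pyGetD l (i+1) ' ')
              = PySem.Chars.lowerChar (PySem.List.pyGetD l (i+2) ' ')
          ∧ PySem.Chars.lowerChar (PySem.List.pyGetD l (i+2) ' ')
              = PySem.Chars.lowerChar (PySem.List.pyGetD l (i+3) ' ') then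
        if i + 4 < (l.length : Int)
            ∧ PySem.Chars.lowerChar (PySem.List.pyGetD l i ' ')
                = PySem.Chars.lowerChar (PySem.List.pyGetD l (i+4) ' ') then
          acc
        else acc + 1
      else acc)
    = (fun (acc i : Int) =>
      if (fun i : Int => decide ((PySem.Chars.upperChar (PySem.List.pyGetD l i ' ') ∈ (['A','T','C','G'] : List Char)
          ∧ PySem.Chars.lowerChar (PySem.List.pyGetD l i ' ')
              = PySem.Chars.lowerChar (PySem.List.pyGetD l (i+1) ' ')
          ∧ PySem.Chars.lowerChar (PySem.List.pyGetD l (i+1) ' ')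
              = PySem.Chars.lowerChar (PySem.List.pyGetD l (i+2) ' ')
          ∧ PySem.Chars.lowerChar (PySem.List.pyGetD l (i+2) ' ')
              = PySem.Chars.lowerChar (PySem.List.pyGetD l (i+3) ' '))
          ∧ ¬(i + 4 < (l.length : Int)
            ∧ PySem.Chars.lowerChar (PySem.List.pyGetD l i ' ')
                = PySem.Chars.lowerChar (PySem.List.pyGetD l (i+4) ' ')))) i = true
        then acc + 1 else acc) := by
    funext acc i
    simp only [decide_eq_true_eq]
    split_ifs <;> first | rfl | tauto
  rw [hfun, PySem.List.pyRange_one, List.foldl_map, PySem.List.foldl_count_if]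
  rw [zero_add, Nat.cast_inj]
  have hml : (List.map PySem.Chars.lowerChar l).length = l.length := List.length_map ..
  have hidx : ((l.length : Int) - 3 - 0).toNat = l.length - 3 := by omega
  rw [hidx, pv_countP_drop3, hml]
  apply List.countP_congr
  intro y hy
  rw [List.mem_range] at hy
  have c1 : ((y:Int) + 1) = ((y+1 : Nat) : Int) := by push_cast; ring
  have c2 : ((y:Int) + 2) = ((y+2 : Nat) : Int) := by push_cast; ring
  have c3 : ((y:Int) + 3) = ((y+3 : Nat) : Int) := by push_cast; ring
  have c4 : ((y:Int) + 4) = ((y+4 : Nat) : Int) := by push_cast; ring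
  simp only [zero_add, c1, c2, c3, c4, PySem.List.pyGetD_natCast, decide_eq_true_eq, pvWb, hml]
  constructor
  · rintro ⟨⟨hmem, h01, h12, h23⟩, hnext⟩
    refine ⟨by omega, by rw [hget]; exact (pv_upperMemIff _).mp hmem,
      by rw [hget, hget]; exact h01,
      by rw [hget, hget]; exact h12,
      by rw [hget, hget]; exact h23, ?_⟩
    rintro ⟨hlt, heq⟩
    rw [hget, hget] at heq
    exact hnext ⟨by exact_mod_cast hlt, heq⟩
  · rintro ⟨h3, hmem, h01, h12, h23, hnext⟩
    rw [hget] at hmem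
    rw [hget, hget] at h01 h12 h23
    refine ⟨⟨(pv_upperMemIff _).mpr hmem, h01, h12, h23⟩, ?_⟩
    rintro ⟨hlt, heq⟩
    exact hnext ⟨by exact_mod_cast hlt, by rw [hget, hget]; exact heq⟩

theorem pv_countP_eq_countRunsB (m : List Char) :
    ((List.range m.length).countP (pvWb m) : Int) = countRunsB m := by
  induction m using countRunsB.induct with
  | case1 => simp [countRunsB]
  | case2 c rest ih =>
    have htw : rest.takeWhile (· == c) = List.replicate (rest.takeWhile (· == c)).length c :=
      List.eq_replicate_of_mem (fun b hb => by
        have := List.mem_takeWhile_imp hb; exact eq_of_beq this)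
    have hm : c :: rest =
        List.replicate (1 + (rest.takeWhile (· == c)).length) c ++ rest.dropWhile (· == c) := by
      have h1 : List.replicate (1 + (rest.takeWhile (· == c)).length) c
          = c :: List.replicate (rest.takeWhile (· == c)).length c := by
        rw [Nat.add_comm]; rfl
      rw [h1, ← htw, List.cons_append, List.takeWhile_append_dropWhile]
    have hlen : (c :: rest).length =
        (1 + (rest.takeWhile (· == c)).length) + (rest.dropWhile (· == c)).length := by
      rw [hm]; simp
    have ht : ∀ d ∈ (rest.dropWhile (· == c)).head?, d ≠ c := by
      intro d hd
      rcases h : rest.dropWhile (· == c) with _ | ⟨e, t'⟩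
      · simp [h] at hd
      · have hne : rest.dropWhile (· == c) ≠ [] := by simp [h]
        have := List.head_dropWhile_not (· == c) hne
        simp [h] at hd this
        subst hd; intro hh; exact this (by simp [hh])
    rw [countRunsB]
    rw [hlen]
    conv_lhs => rw [hm]
    rw [pv_countP_run c _ _ (by omega) ht]
    push_cast
    rw [ih]
    simp only [pvAtcg]
    split_ifs <;> simp

-- A computes the window count over the lowercased list
theorem pv_A_eq_countP (sequence : String) :
    count_sequence sequence =
      ((List.range (sequence.toList.map PySem.Chars.lowerChar).length).countP
        (pvWb (sequence.toList.map PySem.Chars.lowerChar)) : Int) :=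
  pv_A_fold sequence.toList

-- ===== VERDICT (by name: the statement is the Claim_ definition above) =====
theorem count_sequence_spec : Claim_equal_count_sequence := by
  intro sequence _
  unfold Spec_count_sequence count_sequence_alt
  rw [pv_A_eq_countP]
  have hl : PySem.Chars.lower sequence.toList = sequence.toList.map PySem.Chars.lowerChar := rfl
  rw [hl, pv_countP_eq_countRunsB]
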